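-- pv_equiv track=rewrite | github.com/hong0002/Baekjoon | 기타/지능형 기차 2.py | max_people_on_train
-- ===== SOURCE A (Python) =====
-- def max_people_on_train(stops):
--     max_people = 0
--     current_people = 0
--
--     for out_count, in_count in stops:
--         current_people -= out_count
--         current_people += in_count
--         if current_people > max_people:
--             max_people = current_people
--
--     return max_people
-- ===== SOURCE B (Python) =====
-- def max_people_on_train(stops):
--     # Right-to-left clamped recurrence (Kadane-style on suffixes):
--     # best after processing a suffix is the largest onboard count reachable
--     # starting from that stop, floored at 0. No running maximum and no
--     # current-count variable are maintained.
--     best = 0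
--     for out_count, in_count in reversed(stops):
--         best = max(0, in_count - out_count + best)
--     return best
-- ===== Notes on version B (the rewrite author's own statement) =====
-- stated objective: alternative
-- what changed: B replaces A's forward loop tracking (current, running max) with a right-to-left single-accumulator recurrence best = max(0, delta + best) over reversed stops (a foldr/Kadane-style suffix formulation with no current-count or max variable).
import Mathlib
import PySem

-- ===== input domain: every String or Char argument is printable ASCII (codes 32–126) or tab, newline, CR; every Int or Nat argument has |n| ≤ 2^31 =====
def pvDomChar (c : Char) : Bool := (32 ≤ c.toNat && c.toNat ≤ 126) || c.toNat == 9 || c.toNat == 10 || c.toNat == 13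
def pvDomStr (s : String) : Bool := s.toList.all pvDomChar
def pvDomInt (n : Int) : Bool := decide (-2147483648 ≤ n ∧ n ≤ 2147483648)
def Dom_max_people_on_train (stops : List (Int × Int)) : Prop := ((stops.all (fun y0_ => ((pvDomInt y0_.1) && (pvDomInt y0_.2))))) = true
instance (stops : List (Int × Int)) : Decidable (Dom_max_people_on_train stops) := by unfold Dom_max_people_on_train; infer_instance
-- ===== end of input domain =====

-- B replaces A's forward (current, running-max) loop by a right-to-left clamped
-- recurrence best = max(0, delta + best) over the reversed stops; same O(n) cost.


-- ===== PORT A =====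
-- A's loop: fold over stops carrying (max_people, current_people)
def max_people_on_train (stops : List (Int × Int)) : Int :=
  (stops.foldl
    (fun (st : Int × Int) (p : Int × Int) =>
      let cp := st.2 - p.1 + p.2
      (if cp > st.1 then cp else st.1, cp))
    (0, 0)).1

-- ===== PORT B =====
-- B's loop over reversed(stops) with accumulator best = max(0, in - out + best) is a foldr
def max_people_on_train_alt (stops : List (Int × Int)) : Int :=
  stops.foldr (fun (p : Int × Int) (best : Int) => max 0 (p.2 - p.1 + best)) 0

-- ===== PRECONDITION & SPEC =====
def Spec_max_people_on_train (stops : List (Int × Int)) (out : Int) : Prop := out = max_people_on_train_alt stops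
instance (stops : List (Int × Int)) (out : Int) : Decidable (Spec_max_people_on_train stops out) := by unfold Spec_max_people_on_train; infer_instance

-- ===== CLAIM (what is proved, stated in full; the proofs are below) =====
def Claim_equal_max_people_on_train : Prop := ∀ (stops : List (Int × Int)), Dom_max_people_on_train stops → Spec_max_people_on_train stops (max_people_on_train stops)

-- ===== LEMMAS AND PROOFS =====
theorem pvAlt_nonneg (stops : List (Int × Int)) : 0 ≤ max_people_on_train_alt stops := by
  cases stops with
  | nil => simp [max_people_on_train_alt]
  | cons p rest => simp [max_people_on_train_alt]

theorem pvLoop_eq (stops : List (Int × Int)) : ∀ (mp cp : Int), cp ≤ mp →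
    (stops.foldl
      (fun (st : Int × Int) (p : Int × Int) =>
        let cp := st.2 - p.1 + p.2
        (if cp > st.1 then cp else st.1, cp))
      (mp, cp)).1 = max mp (cp + max_people_on_train_alt stops) := by
  induction stops with
  | nil =>
    intro mp cp h
    simp [max_people_on_train_alt]
    omega
  | cons p rest ih =>
    intro mp cp h
    obtain ⟨o, i⟩ := p
    simp only [List.foldl_cons]
    have hrest : 0 ≤ max_people_on_train_alt rest := pvAlt_nonneg rest
    have hstep : (if cp - o + i > mp then cp - o + i else mp) = max mp (cp - o + i) := by
      rw [max_def]; split_ifs <;> omega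
    simp only [hstep]
    rw [ih (max mp (cp - o + i)) (cp - o + i) (le_max_right _ _)]
    have halt : max_people_on_train_alt ((o, i) :: rest)
        = max 0 (i - o + max_people_on_train_alt rest) := by
      simp [max_people_on_train_alt]
    rw [halt]
    rw [max_def, max_def, max_def, max_def]
    split_ifs <;> omega

-- ===== VERDICT (by name: the statement is the Claim_ definition above) =====
theorem max_people_on_train_spec : Claim_equal_max_people_on_train := by
  intro stops _
  unfold Spec_max_people_on_train max_people_on_train
  rw [pvLoop_eq stops 0 0 le_rfl]
  have := pvAlt_nonneg stops
  omega
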